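-- pv_equiv track=rewrite | github.com/JonatasFontele/neps.academy-problems-Python | billiards_cues.py | consult_cue
-- ===== SOURCE A (Python) =====
-- from collections import Counter
--
-- def consult_cue(stock_queries):
--     made = 0
--     # Creates a container that stores elements as a dictionary with Counter({number: quantity})
--     count_queries = Counter(stock_queries)
--     # Creates a container that stores elements as a dictionary with {quantities_repeated: quantity}
--     count_amount = Counter(count_queries.values())
--     for key, value in count_amount.items():
--         # quantities_repeated is odd. Ex.: 3 x 100 cm (4 made) + 3 x 80 cm (4 made) + 3 x 50 cm (4 made) = 12 cues made
--         if key % 2: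
--             made += (key + 1) * value
--         # quantities_repeated is even. Ex.: 2 x 100 cm (2 made) + 2 x 80 cm (2 made) + 2 x 50 cm (2 made) = 6 cues made
--         else:
--             made += key * value
--     return made
-- ===== SOURCE B (Python) =====
-- def consult_cue(stock_queries):
--     # Different algorithm: sort, then scan equal runs with two indices (no Counter/hash table).
--     qs = sorted(stock_queries)
--     made = 0
--     i = 0
--     n = len(qs)
--     while i < n:
--         j = i + 1
--         while j < n and qs[j] == qs[i]:
--             j += 1
--         run = j - i
--         made += run + run % 2
--         i = j
--     return made
-- ===== Notes on version B (the rewrite author's own statement) =====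
-- stated objective: alternative
-- what changed: B uses no Counter at all: it sorts the list and scans it once with two indices, adding for each run of equal values its length rounded up to the next even number; A builds two hash Counters (counts, then frequency-of-frequencies) and sums over the second.
import Mathlib
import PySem

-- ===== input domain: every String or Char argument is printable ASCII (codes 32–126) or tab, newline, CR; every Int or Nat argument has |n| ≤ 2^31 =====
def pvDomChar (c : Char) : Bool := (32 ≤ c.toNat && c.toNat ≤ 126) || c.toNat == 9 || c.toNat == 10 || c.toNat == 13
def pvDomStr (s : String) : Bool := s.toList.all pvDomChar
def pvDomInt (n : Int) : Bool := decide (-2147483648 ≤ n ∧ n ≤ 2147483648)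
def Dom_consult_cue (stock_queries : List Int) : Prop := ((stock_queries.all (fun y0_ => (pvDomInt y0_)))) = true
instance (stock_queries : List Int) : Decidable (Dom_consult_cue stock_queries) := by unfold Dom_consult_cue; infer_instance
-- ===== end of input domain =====

-- B replaces A's two hash Counters by sort + one run-length scan: a different algorithm of similar cost.

-- ===== PORT A =====
def consult_cue (stock_queries : List Int) : Int :=
  let count_queries : PySem.Dict Int Int := PySem.Dict.counter stock_queries
  let count_amount : PySem.Dict Int Int := PySem.Dict.counter count_queries.values
  count_amount.items.foldl
    (fun made kv =>
      if PySem.Int.mod kv.1 2 ≠ 0 then made + (kv.1 + 1) * kv.2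
      else made + kv.1 * kv.2) 0

-- ===== PORT B =====
-- The outer while loop over the sorted list; the inner 'while j < n and qs[j] == qs[i]' that
-- advances j over the run of qs[i] is ported exactly as takeWhile/dropWhile on the tail.
def consult_cue_alt_runs : Int → List Int → Int
  | made, [] => made
  | made, x :: xs =>
      let run : Int := 1 + ((xs.takeWhile (fun q => q == x)).length : Int)
      consult_cue_alt_runs (made + (run + PySem.Int.mod run 2)) (xs.dropWhile (fun q => q == x))
termination_by _ l => l.length
decreasing_by
  exact Nat.lt_succ_of_le (List.length_dropWhile_le _ _)

def consult_cue_alt (stock_queries : List Int) : Int :=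
  consult_cue_alt_runs 0 (PySem.List.sorted stock_queries (fun x => x) false)

-- ===== PRECONDITION & SPEC =====
def Spec_consult_cue (stock_queries : List Int) (out : Int) : Prop := out = consult_cue_alt stock_queries
instance (stock_queries : List Int) (out : Int) : Decidable (Spec_consult_cue stock_queries out) := by unfold Spec_consult_cue; infer_instance

-- ===== CLAIM (what is proved, stated in full; the proofs are below) =====
def Claim_equal_consult_cue : Prop := ∀ (stock_queries : List Int), Dom_consult_cue stock_queries → Spec_consult_cue stock_queries (consult_cue stock_queries)

-- ===== LEMMAS AND PROOFS =====

-- f c: c rounded up to the next even number, in the form A's branch computes it.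
def pvF (c : Int) : Int := if PySem.Int.mod c 2 = 0 then c else c + 1

-- the common reference value: the per-distinct-element sum of rounded-up counts
def pvT (l : List Int) : Int :=
  ((PySem.Set.ofList l).map (fun k => pvF ((l.count k : Nat) : Int))).sum

theorem pv_fmod (c : Int) : c + PySem.Int.mod c 2 = pvF c := by
  have h : PySem.Int.mod c 2 = c % 2 := by
    simp [PySem.Int.mod, Int.fmod_eq_emod]
  unfold pvF
  rw [h]
  have := Int.emod_two_eq_zero_or_one c
  rcases this with h2 | h2 <;> simp [h2]

theorem pv_body_eq :
    (fun (made : Int) (kv : Int × Int) =>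
      if PySem.Int.mod kv.1 2 ≠ 0 then made + (kv.1 + 1) * kv.2 else made + kv.1 * kv.2)
    = (fun made kv => made + pvF kv.1 * kv.2) := by
  funext made kv
  unfold pvF
  by_cases h : PySem.Int.mod kv.1 2 = 0
  · rw [if_neg (not_not.mpr h), if_pos h]
  · rw [if_pos h, if_neg h]

theorem pv_sum_split (s : List Int) (t : Int → Int) (x : Int) (hnd : s.Nodup) (hx : x ∈ s) :
    (s.map t).sum = t x + ((PySem.Set.discard s x).map t).sum := by
  induction s with
  | nil => cases hx
  | cons y ys ih =>
    have hnd' := hnd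
    simp only [List.nodup_cons] at hnd'
    rcases List.mem_cons.mp hx with h | h
    · subst h
      have : PySem.Set.discard (x :: ys) x = ys := by
        unfold PySem.Set.discard
        simp only [List.filter_cons, beq_self_eq_true, Bool.not_true, Bool.false_eq_true, if_false]
        exact List.filter_eq_self.mpr (fun a ha => by
          simp only [Bool.not_eq_eq_eq_not, Bool.not_true, beq_eq_false_iff_ne, ne_eq]
          exact fun e => hnd'.1 (e ▸ ha))
      rw [this]; simp
    · have hyx : y ≠ x := fun e => hnd'.1 (e ▸ h)
      have : PySem.Set.discard (y :: ys) x = y :: PySem.Set.discard ys x := by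
        unfold PySem.Set.discard
        simp [hyx]
      rw [this]
      simp only [List.map_cons, List.sum_cons, ih hnd'.2 h]
      ring

theorem pv_discard_of_not_mem (s : List Int) (x : Int) (hx : x ∉ s) :
    PySem.Set.discard s x = s := by
  unfold PySem.Set.discard
  exact List.filter_eq_self.mpr (fun a ha => by
    simp only [Bool.not_eq_eq_eq_not, Bool.not_true, beq_eq_false_iff_ne, ne_eq]
    exact fun e => hx (e ▸ ha))

-- Grouping: the per-distinct-element sum weighted by multiplicities equals the plain sum.
theorem pv_grouped_sum (f : Int → Int) (l : List Int) :
    ((PySem.Set.ofList l).map (fun k => f k * (l.count k : Int))).sum = (l.map f).sum := by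
  induction l with
  | nil => rfl
  | cons x xs ih =>
    rw [PySem.Set.ofList_cons]
    simp only [List.map_cons, List.sum_cons, List.count_cons_self]
    have hcount : ∀ k ∈ PySem.Set.discard (PySem.Set.ofList xs) x,
        (x :: xs).count k = xs.count k := by
      intro k hk
      have : k ≠ x := ((PySem.Set.mem_discard _ _ _).mp hk).2
      simp [Ne.symm this]
    have hmap : (PySem.Set.discard (PySem.Set.ofList xs) x).map
          (fun k => f k * ((x :: xs).count k : Int))
        = (PySem.Set.discard (PySem.Set.ofList xs) x).map
          (fun k => f k * (xs.count k : Int)) :=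
      List.map_congr_left (fun k hk => by rw [hcount k hk])
    rw [hmap]
    by_cases hx : x ∈ xs
    · have hx' : x ∈ PySem.Set.ofList xs := (PySem.Set.mem_ofList _ _).mpr hx
      have := pv_sum_split (PySem.Set.ofList xs) (fun k => f k * (xs.count k : Int)) x
        (PySem.Set.nodup_ofList _) hx'
      rw [← ih, this]
      push_cast
      ring
    · have h0 : xs.count x = 0 := List.count_eq_zero.mpr hx
      have hd : PySem.Set.discard (PySem.Set.ofList xs) x = PySem.Set.ofList xs :=
        pv_discard_of_not_mem _ _ (fun h => hx ((PySem.Set.mem_ofList _ _).mp h))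
      rw [hd, ih, h0]
      push_cast
      ring

-- A-side: A computes pvT.
theorem pv_A_eq_T (l : List Int) : consult_cue l = pvT l := by
  unfold consult_cue
  set vals := (PySem.Dict.counter l : PySem.Dict Int Int).values with hv
  rw [pv_body_eq, PySem.List.foldl_add, PySem.Dict.items_counter]
  rw [List.map_map]
  simp only [Function.comp_def, zero_add]
  rw [pv_grouped_sum pvF vals]
  have hvals : vals = (PySem.Set.ofList l).map (fun k => ((l.count k : Nat) : Int)) := by
    rw [hv]
    show ((PySem.Dict.counter l : PySem.Dict Int Int).items.map (·.2)) = _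
    rw [PySem.Dict.items_counter, List.map_map]
    rfl
  rw [hvals, List.map_map]
  rfl

-- pvT is invariant under permutation.
theorem pv_T_perm (l l' : List Int) (h : l.Perm l') : pvT l = pvT l' := by
  unfold pvT
  have hmem : ∀ a, a ∈ PySem.Set.ofList l ↔ a ∈ PySem.Set.ofList l' := by
    intro a
    rw [PySem.Set.mem_ofList, PySem.Set.mem_ofList]
    exact ⟨fun hx => h.mem_iff.mp hx, fun hx => h.mem_iff.mpr hx⟩
  have hperm : (PySem.Set.ofList l).Perm (PySem.Set.ofList l') :=
    (List.perm_ext_iff_of_nodup (PySem.Set.nodup_ofList _) (PySem.Set.nodup_ofList _)).mpr hmem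
  have hcount : ∀ k, l.count k = l'.count k := fun k => h.count_eq k
  calc ((PySem.Set.ofList l).map (fun k => pvF ((l.count k : Nat) : Int))).sum
      = ((PySem.Set.ofList l).map (fun k => pvF ((l'.count k : Nat) : Int))).sum := by
        simp only [hcount]
    _ = ((PySem.Set.ofList l').map (fun k => pvF ((l'.count k : Nat) : Int))).sum :=
        (hperm.map _).sum_eq

-- B-side run lemma: on a ≤-sorted list the run scan computes pvT.
theorem pv_runs_eq : ∀ (n : Nat) (s : List Int), s.length ≤ n → s.Pairwise (· ≤ ·) →
    ∀ made, consult_cue_alt_runs made s = made + pvT s := by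
  intro n
  induction n with
  | zero =>
    intro s hlen _ made
    have : s = [] := List.eq_nil_of_length_eq_zero (Nat.le_zero.mp hlen)
    subst this
    simp [consult_cue_alt_runs, pvT, PySem.Set.ofList]
  | succ n ih =>
    intro s hlen hs made
    match s, hlen, hs with
    | [], _, _ => simp [consult_cue_alt_runs, pvT, PySem.Set.ofList]
    | x :: xs, hlen, hs =>
      have hpw := List.pairwise_cons.mp hs
      set t := xs.takeWhile (fun q => q == x) with ht
      set d := xs.dropWhile (fun q => q == x) with hd
      have hxs : xs = t ++ d := (List.takeWhile_append_dropWhile).symm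
      have htall : ∀ q ∈ t, q = x := by
        intro q hq
        have := List.mem_takeWhile_imp (ht ▸ hq)
        simpa using this
      -- x does not occur in d
      have hxd : x ∉ d := by
        intro hmem
        obtain ⟨y, ys, hdd⟩ : ∃ y ys, d = y :: ys := by
          cases hc : d with
          | nil => rw [hc] at hmem; cases hmem
          | cons a b => exact ⟨a, b, rfl⟩
        have hy : (y == x) = false := by
          have h := List.head?_dropWhile_not (fun q => q == x) xs
          rw [← hd, hdd] at h
          simpa using h
        have hymem : y ∈ xs := by
          rw [hxs, hdd]; exact List.mem_append_right _ (.head _)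
        have hyx : x < y := by
          rcases lt_or_eq_of_le (hpw.1 y hymem) with hlt | heq
          · exact hlt
          · subst heq; simp at hy
        have hdpw : (y :: ys).Pairwise (· ≤ ·) :=
          hdd ▸ hpw.2.sublist (hd ▸ List.dropWhile_sublist _)
        rw [hdd] at hmem
        rcases List.mem_cons.mp hmem with h | h
        · exact absurd h (ne_of_lt hyx)
        · exact absurd hyx (not_lt.mpr ((List.pairwise_cons.mp hdpw).1 x h))
      -- the run length is the count of x in x :: xs
      have hcx : ((x :: xs).count x : Int) = 1 + (t.length : Int) := by
        have h1 : (x :: xs).count x = xs.count x + 1 := List.count_cons_self ..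
        have h2 : xs.count x = t.length := by
          rw [hxs, List.count_append]
          have ht0 : t.count x = t.length := List.count_eq_length.mpr (fun a ha => by
            simp [htall a ha])
          have hd0 : d.count x = 0 := List.count_eq_zero.mpr hxd
          omega
        rw [h1, h2]; push_cast; ring
      -- counts of non-x elements survive into d
      have hcd : ∀ k, k ≠ x → (x :: xs).count k = d.count k := by
        intro k hk
        have h1 : (x :: xs).count k = xs.count k := by simp [Ne.symm hk]
        rw [h1, hxs, List.count_append]
        have : t.count k = 0 := List.count_eq_zero.mpr (fun hkt => hk (htall k hkt))
        omega
      -- key decomposition of the reference sum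
      have hT : pvT (x :: xs) = pvF (1 + (t.length : Int)) + pvT d := by
        unfold pvT
        rw [PySem.Set.ofList_cons, List.map_cons, List.sum_cons, ← hcx]
        congr 1
        have hofd : ∀ a, a ∈ PySem.Set.discard (PySem.Set.ofList xs) x ↔ a ∈ PySem.Set.ofList d := by
          intro a
          rw [PySem.Set.mem_discard, PySem.Set.mem_ofList, PySem.Set.mem_ofList]
          constructor
          · rintro ⟨ha, hax⟩
            rw [hxs] at ha
            rcases List.mem_append.mp ha with h | h
            · exact absurd (htall a h) hax
            · exact h
          · intro ha
            refine ⟨by rw [hxs]; exact List.mem_append_right _ ha, ?_⟩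
            exact fun e => hxd (e ▸ ha)
        have hperm : (PySem.Set.discard (PySem.Set.ofList xs) x).Perm (PySem.Set.ofList d) :=
          (List.perm_ext_iff_of_nodup
            (PySem.Set.nodup_discard _ _ (PySem.Set.nodup_ofList _))
            (PySem.Set.nodup_ofList _)).mpr hofd
        calc ((PySem.Set.discard (PySem.Set.ofList xs) x).map
                (fun k => pvF (((x :: xs).count k : Nat) : Int))).sum
            = ((PySem.Set.discard (PySem.Set.ofList xs) x).map
                (fun k => pvF ((d.count k : Nat) : Int))).sum := by
              refine congrArg List.sum (List.map_congr_left (fun k hk => ?_))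
              have hkx : k ≠ x := ((PySem.Set.mem_discard _ _ _).mp hk).2
              rw [hcd k hkx]
          _ = ((PySem.Set.ofList d).map (fun k => pvF ((d.count k : Nat) : Int))).sum :=
              (hperm.map _).sum_eq
      -- one step of the loop, then the inductive hypothesis on d
      have hstep : consult_cue_alt_runs made (x :: xs) =
          consult_cue_alt_runs
            (made + ((1 + (t.length : Int)) + PySem.Int.mod (1 + (t.length : Int)) 2)) d := by
        rw [consult_cue_alt_runs]
      have hdlen : d.length ≤ n := by
        have : d.length ≤ xs.length := hd ▸ List.length_dropWhile_le _ _
        simp only [List.length_cons] at hlen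
        omega
      have hdpw : d.Pairwise (· ≤ ·) := hpw.2.sublist (hd ▸ List.dropWhile_sublist _)
      rw [hstep, ih d hdlen hdpw, hT, pv_fmod]
      ring

-- ===== VERDICT (by name: the statement is the Claim_ definition above) =====
theorem consult_cue_spec : Claim_equal_consult_cue := by
  intro l _
  unfold Spec_consult_cue consult_cue_alt
  rw [pv_A_eq_T]
  have hs := PySem.List.sorted_pairwise l (fun x => x) (κ := Int)
  rw [pv_runs_eq (PySem.List.sorted l (fun x => x) false).length _ le_rfl (by simpa using hs) 0, zero_add]
  exact pv_T_perm l _ (PySem.List.sorted_perm l (fun x => x) false).symm
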